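-- pv_equiv track=rewrite | github.com/MikhailHal/LeetCode | 49.group-anagrams.py | __get_occurence_of_str
-- ===== SOURCE A (Python) =====
-- def __get_occurence_of_str(value: str) -> dict:
--     result = {}
--     value = sorted(value)
--     for c in value:
--         if not c in result:
--             result[c] = 1
--         else:
--             result[c] += 1
--     return result
-- ===== SOURCE B (Python) =====
-- def __get_occurence_of_str(value: str) -> dict:
--     # Fixed-alphabet table scan: walk the ASCII codes 0..127 in increasing order
--     # and, for each character of the alphabet, tally its occurrences in the
--     # (unsorted) string; emit the characters that occur. No sorting, no
--     # dict-based counting pass.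
--     result = {}
--     for code in range(128):
--         c = chr(code)
--         n = sum(1 for ch in value if ch == c)
--         if n != 0:
--             result[c] = n
--     return result
-- ===== Notes on version B (the rewrite author's own statement) =====
-- stated objective: alternative
-- what changed: A sorts the whole string and counts into a dict in one pass over the sorted characters; B never sorts: it scans the fixed ASCII alphabet 0..127 in code order and tallies each alphabet character's occurrences in the unsorted string, emitting only the characters that occur.
import Mathlib
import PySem

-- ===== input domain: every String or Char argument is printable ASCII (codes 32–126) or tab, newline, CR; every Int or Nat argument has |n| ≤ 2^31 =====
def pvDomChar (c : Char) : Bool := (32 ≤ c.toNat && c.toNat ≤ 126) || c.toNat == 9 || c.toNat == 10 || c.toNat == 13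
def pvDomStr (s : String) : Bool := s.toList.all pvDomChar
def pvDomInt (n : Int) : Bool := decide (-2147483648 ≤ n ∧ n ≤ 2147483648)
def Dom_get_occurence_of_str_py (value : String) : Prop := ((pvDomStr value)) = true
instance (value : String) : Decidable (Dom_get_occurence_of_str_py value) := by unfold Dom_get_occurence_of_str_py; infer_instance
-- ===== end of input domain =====

-- B replaces A's sort-then-count with a fixed-alphabet table scan (walk ASCII codes 0..127 in
-- order, tally each alphabet character in the unsorted string, emit the ones that occur):
-- no sorting and no dict-based counting; same result on the ASCII domain.

-- ===== PORT A =====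
-- A: sort the whole string, then count each character into a dict
-- (keys are one-character strings, so the dict is keyed by Char and the
--  one-char-String keys are materialised in the returned items).
def get_occurence_of_str_py (value : String) : List (String × Int) :=
  let sortedValue := PySem.List.sorted value.toList (fun c => c) false
  let result : PySem.Dict Char Int :=
    sortedValue.foldl (fun d c =>
      if d.contains c = false then d.insert c 1
      else d.insert c (d.getD c 0 + 1)) PySem.Dict.empty
  result.items.map (fun p => (String.mk [p.1], p.2))

-- ===== PORT B =====
-- B: scan the ASCII alphabet 0..127 in code order; for each alphabet character,
-- tally its occurrences in the unsorted string with the genexp-sum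
-- 'sum(1 for ch in value if ch == c)'; emit (c, n) when n ≠ 0.  Each loop
-- iteration uses a distinct fresh key, so the Python dict build is exactly an
-- append to the association list.  chr(code) for code in 0..127 is Char.ofNat.
def get_occurence_of_str_py_alt (value : String) : List (String × Int) :=
  (PySem.List.pyRange 0 128 1).foldl (fun result code =>
    let c := Char.ofNat code.toNat
    let n : Int := value.toList.foldl (fun acc ch => if ch == c then acc + 1 else acc) 0
    if n ≠ 0 then result ++ [(String.mk [c], n)] else result) []

-- ===== PRECONDITION & SPEC =====
def Spec_get_occurence_of_str_py (value : String) (out : List (String × Int)) : Prop := out = get_occurence_of_str_py_alt value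
instance (value : String) (out : List (String × Int)) : Decidable (Spec_get_occurence_of_str_py value out) := by unfold Spec_get_occurence_of_str_py; infer_instance

-- ===== CLAIM (what is proved, stated in full; the proofs are below) =====
def Claim_equal_get_occurence_of_str_py : Prop := ∀ (value : String), Dom_get_occurence_of_str_py value → Spec_get_occurence_of_str_py value (get_occurence_of_str_py value)

-- ===== LEMMAS AND PROOFS =====

-- B's outer loop shape: 'if p(x): out.append(f(x))' with a Prop test
theorem pvFoldlAppendIte {α β : Type} (p : α → Prop) [DecidablePred p] (f : α → β)
    (l : List α) (acc : List β) :
    l.foldl (fun acc x => if p x then acc ++ [f x] else acc) acc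
      = acc ++ (l.filter (fun x => decide (p x))).map f := by
  induction l generalizing acc with
  | nil => simp
  | cons x t ih =>
    by_cases h : p x
    · simp [h, ih, List.append_assoc]
    · simp [h, ih]

-- the first-occurrence dedup (Set.ofList) of any list is a sublist of it
theorem pvFoldlAddSublist {α : Type} [BEq α] (l s : List α) :
    (l.foldl PySem.Set.add s).Sublist (s ++ l) := by
  induction l generalizing s with
  | nil => simp
  | cons x t ih =>
    simp only [List.foldl_cons]
    refine (ih (PySem.Set.add s x)).trans ?_
    unfold PySem.Set.add
    split
    · exact (List.sublist_cons_self x t).append_left s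
    · rw [List.append_assoc]
      simp
theorem pvOfListSublist {α : Type} [BEq α] (l : List α) :
    (PySem.Set.ofList l).Sublist l := by
  simpa using pvFoldlAddSublist l []

-- Char.ofNat is exact and strictly monotone below 128
theorem pvToNatOfNat (k : Nat) (h : k < 128) : (Char.ofNat k).toNat = k := by
  rw [Char.toNat_ofNat, if_pos (Or.inl (by omega))]
theorem pvOfNatLt (a b : Nat) (ha : a < 128) (hb : b < 128) (hab : a < b) :
    Char.ofNat a < Char.ofNat b := by
  have h1 := pvToNatOfNat a ha
  have h2 := pvToNatOfNat b hb
  rw [Char.lt_def, UInt32.lt_iff_toNat_lt]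
  change (Char.ofNat a).toNat < (Char.ofNat b).toNat
  omega

-- the sorted distinct characters of L ARE the occurring codes 0..127 in code order
theorem pvKeys (L : List Char) (h : ∀ c ∈ L, c.toNat < 128) :
    PySem.List.sorted (PySem.Set.ofList L) (fun c => c) false
      = ((List.range 128).filter (fun k => decide (L.count (Char.ofNat k) ≠ 0))).map Char.ofNat := by
  apply PySem.List.sorted_eq_of_perm_of_pairwise_lt
  · -- the filtered-range char list is a permutation of the distinct characters of L
    have hpw : (((List.range 128).filter (fun k => decide (L.count (Char.ofNat k) ≠ 0))).map Char.ofNat).Pairwise (· < ·) := by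
      rw [List.pairwise_map]
      refine List.Pairwise.filter _ ?_
      refine List.pairwise_lt_range.imp_of_mem ?_
      intro a b ha hb hab
      exact pvOfNatLt a b (List.mem_range.mp ha) (List.mem_range.mp hb) hab
    rw [List.perm_ext_iff_of_nodup (hpw.imp ne_of_lt) (PySem.Set.nodup_ofList _)]
    intro c
    rw [PySem.Set.mem_ofList]
    simp only [List.mem_map, List.mem_filter, List.mem_range, decide_eq_true_eq]
    constructor
    · rintro ⟨k, ⟨_, hcnt⟩, rfl⟩
      exact List.count_pos_iff.mp (Nat.pos_of_ne_zero hcnt)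
    · intro hc
      refine ⟨c.toNat, ⟨h c hc, ?_⟩, Char.ofNat_toNat c⟩
      rw [Char.ofNat_toNat c]
      exact Nat.pos_iff_ne_zero.mp (List.count_pos_iff.mpr hc)
  · rw [List.pairwise_map]
    refine List.Pairwise.filter _ ?_
    refine List.pairwise_lt_range.imp_of_mem ?_
    intro a b ha hb hab
    exact pvOfNatLt a b (List.mem_range.mp ha) (List.mem_range.mp hb) hab

-- the dedup of the sorted character list IS sorted(set(chars))
theorem pvSortedSetEq (l : List Char) :
    PySem.List.sorted (PySem.Set.ofList l) (fun c => c) false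
      = PySem.Set.ofList (PySem.List.sorted l (fun c => c) false) := by
  apply PySem.List.sorted_eq_of_perm_of_pairwise_lt
  · rw [List.perm_ext_iff_of_nodup (PySem.Set.nodup_ofList _) (PySem.Set.nodup_ofList _)]
    intro a
    rw [PySem.Set.mem_ofList, PySem.Set.mem_ofList]
    exact (PySem.List.sorted_perm l (fun c => c) false).mem_iff
  · have hle : (PySem.Set.ofList (PySem.List.sorted l (fun c => c) false)).Pairwise (· ≤ ·) :=
      (PySem.List.sorted_pairwise l (fun c => c)).sublist (pvOfListSublist _)
    have hne : (PySem.Set.ofList (PySem.List.sorted l (fun c => c) false)).Pairwise (· ≠ ·) :=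
      PySem.Set.nodup_ofList _
    exact (hle.and hne).imp (fun h => lt_of_le_of_ne h.1 h.2)

-- A's counting loop over the sorted list is Counter(sorted list)
theorem pvFoldIsCounter (sl : List Char) :
    sl.foldl (fun d c =>
        if d.contains c = false then d.insert c 1
        else d.insert c (d.getD c 0 + 1)) PySem.Dict.empty
      = PySem.Dict.counter sl := by
  rw [← PySem.Dict.foldl_insert_getD_add_one_eq_counter]
  apply PySem.List.foldl_congr_mem
  intro d c _
  by_cases h : d.contains c = false
  · simp [h, PySem.Dict.getD_of_not_contains]
  · simp [h]

-- ===== VERDICT (by name: the statement is the Claim_ definition above) =====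
theorem get_occurence_of_str_py_spec : Claim_equal_get_occurence_of_str_py := by
  intro value hdom
  have hlt : ∀ c ∈ value.toList, c.toNat < 128 := by
    intro c hc
    have := List.all_eq_true.mp hdom c hc
    simp only [pvDomChar, Bool.or_eq_true, Bool.and_eq_true, decide_eq_true_eq, beq_iff_eq] at this
    omega
  unfold Spec_get_occurence_of_str_py get_occurence_of_str_py get_occurence_of_str_py_alt
  simp only [PySem.List.foldl_beq_add_one, PySem.List.pyRange_one, zero_add,
    pvFoldIsCounter, PySem.Dict.items_counter, ← pvSortedSetEq, List.foldl_map,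
    Int.toNat_natCast, Int.sub_zero]
  rw [pvFoldlAppendIte (fun k => ((value.toList.count (Char.ofNat k) : Int) ≠ 0))
    (fun k => (String.mk [Char.ofNat k], (value.toList.count (Char.ofNat k) : Int)))]
  simp only [List.nil_append, Int.natCast_ne_zero]
  rw [pvKeys value.toList hlt, List.map_map, List.map_map]
  apply List.map_congr_left
  intro c hc
  simp only [Function.comp]
  rw [((PySem.List.sorted_perm value.toList (fun c => c) false).count_eq (Char.ofNat c))]
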